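-- pv_equiv track=rewrite | github.com/thomashamson/advent-of-code | 2020/Day 6 - Puzzle 2/main.py | get_all_unique_answers
-- ===== SOURCE A (Python) =====
-- def get_all_unique_answers(responses):
--   questions = []
--
--   for char in responses[0]:
--     allLns = True
--
--     for ln in responses:
--       if char not in ln:
--         allLns = False
--
--     if allLns and char not in questions:
--       questions.append(char)
--
--   return len(questions)
-- ===== SOURCE B (Python) =====
-- def get_all_unique_answers(responses):
--   counts = {}
--   for r in responses:
--     for c in set(r):
--       counts[c] = counts.get(c, 0) + 1
--   n = len(responses)
--   return sum(1 for c in set(responses[0]) if counts.get(c, 0) == n)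
-- ===== Notes on version B (the rewrite author's own statement) =====
-- stated objective: alternative
-- what changed: Replaces the nested scan (for each char of responses[0], rescan every response and dedup against the questions list) by a one-pass character-frequency dictionary over per-response character sets, then counts distinct chars of responses[0] whose count equals len(responses).
import Mathlib
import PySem

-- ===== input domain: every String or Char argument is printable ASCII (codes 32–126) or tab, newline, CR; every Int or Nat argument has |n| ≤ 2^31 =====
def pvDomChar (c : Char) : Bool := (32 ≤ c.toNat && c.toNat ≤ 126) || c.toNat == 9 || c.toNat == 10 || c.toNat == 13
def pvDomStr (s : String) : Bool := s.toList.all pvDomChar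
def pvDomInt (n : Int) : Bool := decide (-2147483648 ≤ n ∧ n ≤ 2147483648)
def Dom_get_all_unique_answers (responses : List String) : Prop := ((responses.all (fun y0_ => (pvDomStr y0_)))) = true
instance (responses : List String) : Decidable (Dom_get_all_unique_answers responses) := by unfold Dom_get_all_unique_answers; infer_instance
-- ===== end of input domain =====

-- B replaces A's nested rescan of all responses per character by a one-pass character-frequency
-- dictionary (count == len(responses) means "present in every response"): a different algorithm of similar cost.

-- ===== PORT A =====
-- 'char in ln' for the single character char is membership of char among ln's characters
def get_all_unique_answers (responses : List String) : Int :=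
  match PySem.List.pyGet? responses 0 with
  | none => 0   -- IndexError in Python; excluded by Pre_
  | some first =>
    let questions : List Char :=
      first.toList.foldl (fun (questions : List Char) char =>
        let allLns := responses.foldl
          (fun allLns ln => if ln.toList.contains char then allLns else false) true
        if allLns && !questions.contains char then questions ++ [char] else questions) []
    (questions.length : Int)

-- ===== PORT B =====
def get_all_unique_answers_alt (responses : List String) : Int :=
  let counts : PySem.Dict Char Int :=
    responses.foldl (fun d r =>
      (PySem.Set.ofList r.toList).foldl (fun d c => d.insert c (d.getD c 0 + 1)) d)
      PySem.Dict.empty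
  let n : Int := responses.length
  match PySem.List.pyGet? responses 0 with
  | none => 0   -- IndexError in Python; excluded by Pre_
  | some first =>
    (PySem.Set.ofList first.toList).foldl
      (fun acc c => if counts.getD c 0 == n then acc + 1 else acc) 0

-- ===== PRECONDITION & SPEC =====
-- Both programs raise IndexError on an empty responses list (the responses[0] lookup); Pre_ excludes it.
def Pre_get_all_unique_answers (responses : List String) : Prop := responses ≠ []
instance (responses : List String) : Decidable (Pre_get_all_unique_answers responses) := by unfold Pre_get_all_unique_answers; infer_instance
def pvWitness_get_all_unique_answers : List String := ["abcab", "bca"]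

def Spec_get_all_unique_answers (responses : List String) (out : Int) : Prop := out = get_all_unique_answers_alt responses
instance (responses : List String) (out : Int) : Decidable (Spec_get_all_unique_answers responses out) := by unfold Spec_get_all_unique_answers; infer_instance

-- ===== CLAIM (what is proved, stated in full; the proofs are below) =====
def Claim_equal_get_all_unique_answers : Prop := ∀ (responses : List String), Dom_get_all_unique_answers responses → Pre_get_all_unique_answers responses → Spec_get_all_unique_answers responses (get_all_unique_answers responses)

-- ===== LEMMAS AND PROOFS =====

-- A's inner loop computes "char occurs in every response"
theorem allLns_fold (responses : List String) (c : Char) (b : Bool) :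
    responses.foldl (fun allLns ln => if ln.toList.contains c then allLns else false) b
      = (b && responses.all (fun ln => ln.toList.contains c)) := by
  induction responses generalizing b with
  | nil => simp
  | cons r rs ih =>
    simp only [List.foldl_cons, List.all_cons]
    rw [ih]
    cases b <;> simp

-- A's outer loop: q0 followed by the first occurrences (in order) of the chars of cs
-- that satisfy P and are not already in q0
theorem questions_fold (P : Char → Bool) (cs : List Char) (q0 : List Char) :
    cs.foldl (fun q char => if P char && !q.contains char then q ++ [char] else q) q0
      = q0 ++ (PySem.Set.ofList cs).filter (fun c => P c && !q0.contains c) := by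
  induction cs generalizing q0 with
  | nil => simp [PySem.Set.ofList_nil]
  | cons c cs ih =>
    rw [PySem.Set.ofList_cons, List.foldl_cons, List.filter_cons]
    by_cases hpc : (P c && !q0.contains c) = true
    · rw [if_pos hpc, if_pos hpc, ih]
      simp only [PySem.Set.discard, List.filter_filter]
      rw [List.append_assoc, List.singleton_append]
      congr 2
      apply List.filter_congr
      intro x _
      by_cases hx : x = c
      · subst hx
        have hq0 : q0.contains x = false := by
          rcases Bool.and_eq_true_iff.mp hpc with ⟨_, h2⟩
          simpa using h2
        simp
      · simp [hx]
    · rw [if_neg hpc, if_neg hpc, ih]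
      congr 1
      simp only [PySem.Set.discard, List.filter_filter]
      apply List.filter_congr
      intro x _
      by_cases hx : x = c
      · subst hx
        rw [Bool.eq_false_iff.mpr hpc]
        simp
      · simp [hx]

-- B's dictionary: its count for c is the number of responses containing c
theorem counts_getD (responses : List String) (d : PySem.Dict Char Int) (c : Char) :
    (responses.foldl (fun d r =>
        (PySem.Set.ofList r.toList).foldl (fun d c => d.insert c (d.getD c 0 + 1)) d) d).getD c 0
      = d.getD c 0 + (responses.countP (fun r => r.toList.contains c) : Int) := by
  induction responses generalizing d with
  | nil => simp
  | cons r rs ih =>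
    rw [List.foldl_cons, ih, PySem.Dict.getD_foldl_insert_add_one]
    have hcount : (PySem.Set.ofList r.toList).count c
        = if r.toList.contains c then 1 else 0 := by
      by_cases h : c ∈ r.toList
      · rw [List.count_eq_one_of_mem (PySem.Set.nodup_ofList _)
          (by simpa [PySem.Set.mem_ofList] using h)]
        simp [h]
      · rw [List.count_eq_zero_of_not_mem (by simpa [PySem.Set.mem_ofList] using h)]
        simp [h]
    rw [List.countP_cons, hcount]
    by_cases h : r.toList.contains c <;> simp <;> ring

-- the two membership tests agree on every character
theorem pred_agree (responses : List String) (c : Char) :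
    (responses.all (fun ln => ln.toList.contains c))
      = ((responses.countP (fun r => r.toList.contains c) : Int) == (responses.length : Int)) := by
  rw [Bool.eq_iff_iff, beq_iff_eq]
  rw [List.all_eq_true]
  constructor
  · intro h
    have : responses.countP (fun r => r.toList.contains c) = responses.length :=
      List.countP_eq_length.mpr h
    exact_mod_cast this
  · intro h
    have : responses.countP (fun r => r.toList.contains c) = responses.length := by
      exact_mod_cast h
    exact List.countP_eq_length.mp this

-- ===== VERDICT (by name: the statement is the Claim_ definition above) =====
theorem get_all_unique_answers_spec : Claim_equal_get_all_unique_answers := by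
  intro responses _ hpre
  unfold Spec_get_all_unique_answers
  cases responses with
  | nil => exact absurd rfl hpre
  | cons r rs =>
    show get_all_unique_answers (r :: rs) = get_all_unique_answers_alt (r :: rs)
    have h0 : PySem.List.pyGet? (r :: rs) 0 = some r := by
      simp [PySem.List.pyGet?, PySem.List.pyIdx?]
    unfold get_all_unique_answers get_all_unique_answers_alt
    rw [h0]
    simp only [allLns_fold, Bool.true_and]
    rw [questions_fold, PySem.List.foldl_count_if]
    simp only [counts_getD, PySem.Dict.getD_empty, List.nil_append, zero_add]
    rw [List.countP_eq_length_filter, Nat.cast_inj]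
    congr 1
    apply List.filter_congr
    intro c _
    simpa using pred_agree (r :: rs) c
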